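-- pv_equiv track=rewrite | github.com/ASSERT-KTH/Mokav | experiments/c4b/AADTI/iteration-10-sample-10-temp-1/generated_tests/1976/23896/temp_acc_qb.py | patched_func
-- ===== SOURCE A (Python) =====
-- def patched_func(*args):
-- 	global_list = []
--
-- 	num = int(args[0])
-- 	stones = list(args[1])
-- 	l = []
-- 	first = stones[0]
-- 	n = 0
-- 	for i in range(1, len(stones)):
-- 	    if (first == stones[i]):
-- 	        l.append(stones[i])
-- 	    else:
-- 	        first = stones[i]
-- 	global_list.append(len(l))
-- 	return global_list
-- ===== SOURCE B (Python) =====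
-- def patched_func(*args):
--     num = int(args[0])
--     stones = list(args[1])
--     total = 0
--     i = 0
--     n = len(stones)
--     while i < n:
--         j = i + 1
--         while j < n and stones[j] == stones[i]:
--             j += 1
--         total += j - i - 1
--         i = j
--     return [total]
-- ===== Notes on version B (the rewrite author's own statement) =====
-- stated objective: alternative
-- what changed: B scans with two pointers, the inner loop jumping to the end of each maximal run and the outer loop summing (run length - 1) per run, instead of A's element-by-element pass that tracks a running leader value and materialises a list of matched stones to take its length.
import Mathlib
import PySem

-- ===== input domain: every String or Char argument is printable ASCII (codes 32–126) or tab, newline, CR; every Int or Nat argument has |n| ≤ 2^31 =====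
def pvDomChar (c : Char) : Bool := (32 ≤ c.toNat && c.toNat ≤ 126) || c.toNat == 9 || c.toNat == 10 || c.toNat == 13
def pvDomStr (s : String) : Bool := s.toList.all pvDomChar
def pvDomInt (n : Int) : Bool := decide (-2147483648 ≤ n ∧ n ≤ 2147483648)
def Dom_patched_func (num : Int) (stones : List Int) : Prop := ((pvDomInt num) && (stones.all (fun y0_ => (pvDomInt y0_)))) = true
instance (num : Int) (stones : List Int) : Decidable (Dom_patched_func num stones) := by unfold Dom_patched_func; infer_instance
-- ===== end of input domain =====

-- B replaces A's leader-tracking single pass (which collects matched stones into a list and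
-- returns its length) by a two-pointer run-skipping scan summing (run length - 1) per maximal run.

-- ===== PORT A =====
-- for i in range(1, len(stones)) with state (first, l); indices are always in range,
-- so pyGetD is exact there; the [] case is the IndexError of stones[0], excluded by Pre_.
def patched_func (num : Int) (stones : List Int) : List Int :=
  match stones with
  | [] => []
  | s0 :: _ =>
    let st := (PySem.List.pyRange 1 (stones.length : Int) 1).foldl
      (fun (st : Int × List Int) i =>
        let x := PySem.List.pyGetD stones i 0
        if st.1 == x then (st.1, st.2 ++ [x]) else (x, st.2))
      (s0, ([] : List Int))
    [(st.2.length : Int)]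

-- ===== PORT B =====
-- inner while loop: j = i+1; while j < n and stones[j] == stones[i]: j += 1
-- counters are the Python loop's nonnegative ints, kept as Nat (always in range, getD exact).
def pvInnerB (stones : List Int) (h : Int) (j : Nat) : Nat :=
  if _ : j < stones.length then
    if stones.getD j 0 == h then pvInnerB stones h (j + 1) else j
  else j
termination_by stones.length - j

lemma pvInnerB_ge (stones : List Int) (h : Int) (j : Nat) : j ≤ pvInnerB stones h j := by
  unfold pvInnerB
  split
  · split
    · exact le_trans (Nat.le_succ j) (pvInnerB_ge stones h (j + 1))
    · exact le_rfl
  · exact le_rfl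
termination_by stones.length - j

-- outer while loop: while i < n: … total += j - i - 1; i = j
def pvOuterB (stones : List Int) (i : Nat) (total : Int) : Int :=
  if _ : i < stones.length then
    let j := pvInnerB stones (stones.getD i 0) (i + 1)
    pvOuterB stones j (total + (j : Int) - (i : Int) - 1)
  else total
termination_by stones.length - i
decreasing_by
  have := pvInnerB_ge stones (stones.getD i 0) (i + 1)
  omega

def patched_func_alt (num : Int) (stones : List Int) : List Int :=
  [pvOuterB stones 0 0]

-- ===== PRECONDITION & SPEC =====
-- A raises IndexError at stones[0] on empty stones; that is its only exception.
def Pre_patched_func (num : Int) (stones : List Int) : Prop := stones ≠ []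
instance (num : Int) (stones : List Int) : Decidable (Pre_patched_func num stones) := by unfold Pre_patched_func; infer_instance
def pvWitness_patched_func : Int × List Int := (0, [1, 1, 2])

def Spec_patched_func (num : Int) (stones : List Int) (out : List Int) : Prop := out = patched_func_alt num stones
instance (num : Int) (stones : List Int) (out : List Int) : Decidable (Spec_patched_func num stones out) := by unfold Spec_patched_func; infer_instance

-- ===== CLAIM (what is proved, stated in full; the proofs are below) =====
def Claim_equal_patched_func : Prop := ∀ (num : Int) (stones : List Int), Dom_patched_func num stones → Pre_patched_func num stones → Spec_patched_func num stones (patched_func num stones)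

-- ===== LEMMAS AND PROOFS =====

-- middleman: the number of adjacent equal pairs
def adjCountN : List Int → Nat
  | x :: y :: t => (if x = y then 1 else 0) + adjCountN (y :: t)
  | _ => 0

-- A's loop: l grows by one exactly at each adjacent equal pair.
lemma loop_len (t : List Int) : ∀ (f : Int) (l : List Int),
    ((t.foldl (fun (st : Int × List Int) x =>
        if st.1 = x then (st.1, st.2 ++ [x]) else (x, st.2)) (f, l)).2).length
    = l.length + adjCountN (f :: t) := by
  induction t with
  | nil => intro f l; simp [adjCountN]
  | cons x t ih =>
    intro f l
    by_cases h : f = x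
    · subst h
      simp [List.foldl_cons, ih, adjCountN]
      omega
    · simp [List.foldl_cons, ih, h, adjCountN]

-- inner loop: skips the maximal run of h starting at j, and the skipped part contributes
-- one adjacent equal pair per step when the previous element is h.
lemma inner_spec (stones : List Int) (h : Int) (j : Nat) (hj : j ≤ stones.length) :
    adjCountN (h :: stones.drop j)
      = (pvInnerB stones h j - j) + adjCountN (stones.drop (pvInnerB stones h j))
    ∧ j ≤ pvInnerB stones h j ∧ pvInnerB stones h j ≤ stones.length := by
  unfold pvInnerB
  split
  · rename_i hlt
    have hdrop : stones.drop j = stones.getD j 0 :: stones.drop (j + 1) := by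
      rw [List.getD_eq_getElem _ _ hlt]
      exact List.drop_eq_getElem_cons hlt
    split
    · rename_i heq
      have heq' : stones.getD j 0 = h := by simpa using heq
      have ih := inner_spec stones h (j + 1) (by omega)
      refine ⟨?_, by omega, ih.2.2⟩
      rw [hdrop, heq']
      show (if h = h then 1 else 0) + adjCountN (h :: stones.drop (j + 1)) = _
      rw [if_pos rfl, ih.1]
      omega
    · rename_i hne
      have hne' : ¬ (h = stones.getD j 0) := by
        intro hh; exact hne (by simp [hh])
      refine ⟨?_, le_rfl, le_of_lt hlt⟩
      conv_lhs => rw [hdrop]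
      show (if h = stones.getD j 0 then 1 else 0) + adjCountN (stones.getD j 0 :: stones.drop (j + 1)) = _
      rw [if_neg hne', ← hdrop]
      omega
  · rename_i hge
    have : j = stones.length := by omega
    simp [this, adjCountN]
termination_by stones.length - j

-- outer loop accumulates the adjacent-equal-pair count of the remaining suffix.
lemma outer_spec (stones : List Int) (i : Nat) (total : Int) (hi : i ≤ stones.length) :
    pvOuterB stones i total = total + (adjCountN (stones.drop i) : Int) := by
  unfold pvOuterB
  split
  · rename_i hlt
    have hdrop : stones.drop i = stones.getD i 0 :: stones.drop (i + 1) := by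
      rw [List.getD_eq_getElem _ _ hlt]
      exact List.drop_eq_getElem_cons hlt
    obtain ⟨hadj, hge, hle⟩ := inner_spec stones (stones.getD i 0) (i + 1) (by omega)
    have ih := outer_spec stones (pvInnerB stones (stones.getD i 0) (i + 1))
      (total + (pvInnerB stones (stones.getD i 0) (i + 1) : Int) - (i : Int) - 1) hle
    rw [ih, hdrop, hadj]
    push_cast [Nat.cast_sub hge]
    ring
  · rename_i hge
    have : i = stones.length := by omega
    simp [this, adjCountN]
termination_by stones.length - i
decreasing_by
  have := pvInnerB_ge stones (stones.getD i 0) (i + 1)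
  omega

-- ===== VERDICT (by name: the statements are the Claim_ definitions above) =====
theorem patched_func_spec : Claim_equal_patched_func := by
  intro num stones _ hpre
  unfold Spec_patched_func patched_func patched_func_alt
  match stones, hpre with
  | s0 :: rest, _ =>
    simp only []
    rw [PySem.List.foldl_pyRange_pyGetD' (xs := s0 :: rest) (d := 0)
        (f := fun (st : Int × List Int) x =>
          if st.1 == x then (st.1, st.2 ++ [x]) else (x, st.2))
        (init := (s0, ([] : List Int))) (a := 1) (by norm_num)]
    rw [outer_spec (s0 :: rest) 0 0 (by simp)]
    simp [loop_len]
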